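-- pv_equiv track=rewrite | github.com/cmorganbrown/ai-look-generator | look_generator.py | _generate_style_prompt
-- ===== SOURCE A (Python) =====
-- def _generate_style_prompt(products):
--     """Generate a style prompt based on the selected products"""
--     # Analyze products to determine room type and style
--     titles = [p.get('title', '').lower() for p in products]
--
--     # Determine room type
--     room_type = "interior space"
--     if any(word in " ".join(titles) for word in ['bed', 'nightstand', 'dresser']):
--         room_type = "bedroom"
--     elif any(word in " ".join(titles) for word in ['sofa', 'coffee', 'tv', 'entertainment']):
--         room_type = "living room"
--     elif any(word in " ".join(titles) for word in ['vanity', 'bath', 'toilet', 'shower']):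
--         room_type = "bathroom"
--     elif any(word in " ".join(titles) for word in ['table', 'chair', 'dining']):
--         room_type = "dining room"
--     elif any(word in " ".join(titles) for word in ['desk', 'office', 'study']):
--         room_type = "home office"
--
--     # Determine style
--     style = "modern cohesive design"
--     if any(word in " ".join(titles) for word in ['traditional', 'classic', 'antique']):
--         style = "traditional elegant design"
--     elif any(word in " ".join(titles) for word in ['rustic', 'farmhouse', 'country']):
--         style = "rustic warm design"
--     elif any(word in " ".join(titles) for word in ['industrial', 'metal', 'concrete']):
--         style = "industrial modern design"
--     elif any(word in " ".join(titles) for word in ['minimalist', 'simple', 'clean']):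
--         style = "minimalist clean design"
--
--     return f"{room_type} with {style}, professional photography, high-end interior design magazine style"
-- ===== SOURCE B (Python) =====
-- # B classifies each title on its own (no keyword contains a space, so a match can
-- # never straddle the " "-join boundary) and keeps the best (lowest) rule index
-- # seen so far across products, instead of joining everything and running if/elif chains.
--
-- ROOM_GROUPS = [
--     (['bed', 'nightstand', 'dresser'], 'bedroom'),
--     (['sofa', 'coffee', 'tv', 'entertainment'], 'living room'),
--     (['vanity', 'bath', 'toilet', 'shower'], 'bathroom'),
--     (['table', 'chair', 'dining'], 'dining room'),
--     (['desk', 'office', 'study'], 'home office'),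
-- ]
--
-- STYLE_GROUPS = [
--     (['traditional', 'classic', 'antique'], 'traditional elegant design'),
--     (['rustic', 'farmhouse', 'country'], 'rustic warm design'),
--     (['industrial', 'metal', 'concrete'], 'industrial modern design'),
--     (['minimalist', 'simple', 'clean'], 'minimalist clean design'),
-- ]
--
--
-- def _first_index(title, groups):
--     """Index of the first rule group whose keyword occurs in this one title,
--     or len(groups) if none does."""
--     for i, (words, _label) in enumerate(groups):
--         if any(w in title for w in words):
--             return i
--     return len(groups)
--
--
-- def _generate_style_prompt(products):
--     """Generate a style prompt based on the selected products"""
--     room = len(ROOM_GROUPS)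
--     style = len(STYLE_GROUPS)
--     for p in products:
--         t = p.get('title', '').lower()
--         room = min(room, _first_index(t, ROOM_GROUPS))
--         style = min(style, _first_index(t, STYLE_GROUPS))
--     room_type = ROOM_GROUPS[room][1] if room < len(ROOM_GROUPS) else "interior space"
--     style_s = STYLE_GROUPS[style][1] if style < len(STYLE_GROUPS) else "modern cohesive design"
--     return f"{room_type} with {style_s}, professional photography, high-end interior design magazine style"
-- ===== Notes on version B (the rewrite author's own statement) =====
-- stated objective: alternative
-- what changed: Instead of joining all titles into one string and running two if/elif keyword chains over it, B classifies each title independently (first matching rule-group index per title, correct because no keyword contains a space so no match can straddle the join boundary) and folds a running minimum index over the products, indexing the label tables at the end.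
import Mathlib
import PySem

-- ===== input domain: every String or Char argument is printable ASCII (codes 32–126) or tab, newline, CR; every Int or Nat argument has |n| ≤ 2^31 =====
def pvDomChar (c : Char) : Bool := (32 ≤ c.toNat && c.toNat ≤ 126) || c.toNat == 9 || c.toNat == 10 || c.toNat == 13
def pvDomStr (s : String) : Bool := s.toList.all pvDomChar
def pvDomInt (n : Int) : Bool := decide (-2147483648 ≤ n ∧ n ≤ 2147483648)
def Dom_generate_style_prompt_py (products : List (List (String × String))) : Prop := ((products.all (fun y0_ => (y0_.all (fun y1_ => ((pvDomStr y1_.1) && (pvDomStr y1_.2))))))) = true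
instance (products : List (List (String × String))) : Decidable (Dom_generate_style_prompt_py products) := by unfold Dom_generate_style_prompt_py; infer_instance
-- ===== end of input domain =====

-- B classifies each title independently (no keyword contains a space, so a match never
-- straddles the " "-join boundary) and folds a running minimum rule index over the
-- products instead of joining everything and running two if/elif chains (objective: alternative).

-- ===== PORT A =====
def generate_style_prompt_py (products : List (List (String × String))) : String :=
  let titles := products.map (fun p => PySem.Str.lower (PySem.Dict.getD (PySem.Dict.ofList p) "title" ""))
  let room_type :=
    if ["bed", "nightstand", "dresser"].any (fun w => PySem.Str.isIn w (PySem.Str.join " " titles)) then "bedroom"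
    else if ["sofa", "coffee", "tv", "entertainment"].any (fun w => PySem.Str.isIn w (PySem.Str.join " " titles)) then "living room"
    else if ["vanity", "bath", "toilet", "shower"].any (fun w => PySem.Str.isIn w (PySem.Str.join " " titles)) then "bathroom"
    else if ["table", "chair", "dining"].any (fun w => PySem.Str.isIn w (PySem.Str.join " " titles)) then "dining room"
    else if ["desk", "office", "study"].any (fun w => PySem.Str.isIn w (PySem.Str.join " " titles)) then "home office"
    else "interior space"
  let style :=
    if ["traditional", "classic", "antique"].any (fun w => PySem.Str.isIn w (PySem.Str.join " " titles)) then "traditional elegant design"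
    else if ["rustic", "farmhouse", "country"].any (fun w => PySem.Str.isIn w (PySem.Str.join " " titles)) then "rustic warm design"
    else if ["industrial", "metal", "concrete"].any (fun w => PySem.Str.isIn w (PySem.Str.join " " titles)) then "industrial modern design"
    else if ["minimalist", "simple", "clean"].any (fun w => PySem.Str.isIn w (PySem.Str.join " " titles)) then "minimalist clean design"
    else "modern cohesive design"
  room_type ++ " with " ++ style ++ ", professional photography, high-end interior design magazine style"

-- ===== PORT B =====
def pvRoomGroups : List (List String × String) :=
  [(["bed", "nightstand", "dresser"], "bedroom"),
   (["sofa", "coffee", "tv", "entertainment"], "living room"),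
   (["vanity", "bath", "toilet", "shower"], "bathroom"),
   (["table", "chair", "dining"], "dining room"),
   (["desk", "office", "study"], "home office")]

def pvStyleGroups : List (List String × String) :=
  [(["traditional", "classic", "antique"], "traditional elegant design"),
   (["rustic", "farmhouse", "country"], "rustic warm design"),
   (["industrial", "metal", "concrete"], "industrial modern design"),
   (["minimalist", "simple", "clean"], "minimalist clean design")]

-- Source B's _first_index: index of the first group whose keyword occurs in this one title, else len groups
def pvFirstIndex (title : String) : List (List String × String) → Nat
  | [] => 0
  | (words, _) :: rest =>
      if words.any (fun w => PySem.Str.isIn w title) then 0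
      else pvFirstIndex title rest + 1

def generate_style_prompt_py_alt (products : List (List (String × String))) : String :=
  let rs := products.foldl
    (fun (acc : Nat × Nat) p =>
      let t := PySem.Str.lower (PySem.Dict.getD (PySem.Dict.ofList p) "title" "")
      (min acc.1 (pvFirstIndex t pvRoomGroups), min acc.2 (pvFirstIndex t pvStyleGroups)))
    (pvRoomGroups.length, pvStyleGroups.length)
  let room_type := match pvRoomGroups[rs.1]? with
    | some g => g.2
    | none => "interior space"
  let style_s := match pvStyleGroups[rs.2]? with
    | some g => g.2
    | none => "modern cohesive design"
  room_type ++ " with " ++ style_s ++ ", professional photography, high-end interior design magazine style"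

-- ===== PRECONDITION & SPEC =====
def Spec_generate_style_prompt_py (products : List (List (String × String))) (out : String) : Prop := out = generate_style_prompt_py_alt products
instance (products : List (List (String × String))) (out : String) : Decidable (Spec_generate_style_prompt_py products out) := by unfold Spec_generate_style_prompt_py; infer_instance

-- ===== CLAIM (what is proved, stated in full; the proofs are below) =====
def Claim_equal_generate_style_prompt_py : Prop := ∀ (products : List (List (String × String))), Dom_generate_style_prompt_py products → Spec_generate_style_prompt_py products (generate_style_prompt_py products)

-- ===== LEMMAS AND PROOFS =====

-- Str.isIn as an infix statement on the underlying char lists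
lemma pv_isIn_infix (w s : String) : PySem.Str.isIn w s = true ↔ w.toList <:+: s.toList := by
  rw [PySem.Str.isIn_eq]; exact PySem.Chars.isIn_iff_infix _ _

-- a nonempty space-free word that is a prefix of `x ++ ' ' :: y` is a prefix of x
lemma pv_prefix_no_space (cs x y : List Char) (hs : ' ' ∉ cs)
    (h : cs <+: x ++ ' ' :: y) : cs <+: x := by
  rcases h with ⟨t, ht⟩
  by_cases hl : cs.length ≤ x.length
  · have : cs = x.take cs.length := by
      have h1 : (cs ++ t).take cs.length = cs := by simp
      rw [ht] at h1
      rw [List.take_append_of_le_length hl] at h1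
      exact h1.symm
    rw [this]; exact List.take_prefix _ _
  · exfalso
    rw [Nat.not_le] at hl
    apply hs
    have hget : (cs ++ t)[x.length]? = some ' ' := by
      rw [ht]
      rw [List.getElem?_append_right (le_refl _)]
      simp
    rw [List.getElem?_append_left hl] at hget
    exact List.mem_of_getElem? hget

-- splitting an infix occurrence across a single separator
lemma pv_infix_space (cs : List Char) (h0 : cs ≠ []) (hs : ' ' ∉ cs) :
    ∀ a b : List Char, (cs <:+: a ++ ' ' :: b ↔ cs <:+: a ∨ cs <:+: b) := by
  intro a
  induction a with
  | nil =>
    intro b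
    simp only [List.nil_append]
    constructor
    · intro h
      rcases List.infix_cons_iff.mp h with hp | hi
      · exfalso; apply hs
        rcases hp with ⟨t, ht⟩
        cases cs with
        | nil => exact absurd rfl h0
        | cons c cs' =>
          rw [List.cons_append] at ht
          injection ht with h1 _
          simp [h1]
      · exact Or.inr hi
    · rintro (h | h)
      · rw [List.infix_nil] at h; exact absurd h h0
      · exact h.trans (List.suffix_cons ' ' b).isInfix
  | cons c a' ih =>
    intro b
    constructor
    · intro h
      rcases List.infix_cons_iff.mp h with hp | hi
      · have : cs <+: c :: a' := by
          have h2 : cs <+: (c :: a') ++ ' ' :: b := by simpa using hp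
          exact pv_prefix_no_space cs (c :: a') b hs h2
        exact Or.inl this.isInfix
      · rcases (ih b).mp hi with h | h
        · exact Or.inl (h.trans (List.suffix_cons c a').isInfix)
        · exact Or.inr h
    · rintro (h | h)
      · exact h.trans (List.prefix_append (c :: a') (' ' :: b)).isInfix
      · have : cs <:+: a' ++ ' ' :: b := (ih b).mpr (Or.inr h)
        exact this.trans (List.suffix_cons c (a' ++ ' ' :: b)).isInfix

-- infix of a " "-join, char-list level
lemma pv_infix_join (cs : List Char) (h0 : cs ≠ []) (hs : ' ' ∉ cs) :
    ∀ ls : List (List Char), (cs <:+: PySem.Chars.join [' '] ls ↔ ∃ l ∈ ls, cs <:+: l) := by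
  intro ls
  induction ls with
  | nil =>
    rw [PySem.Chars.join_nil]
    simp [List.infix_nil, h0]
  | cons l ls ih =>
    cases ls with
    | nil =>
      rw [PySem.Chars.join_singleton]
      simp
    | cons l' ls' =>
      rw [PySem.Chars.join_cons_cons]
      rw [show l ++ [' '] ++ PySem.Chars.join [' '] (l' :: ls')
            = l ++ ' ' :: PySem.Chars.join [' '] (l' :: ls') by simp]
      rw [pv_infix_space cs h0 hs]
      rw [ih]
      simp

-- 'w in " ".join(titles)' for a nonempty space-free w means 'w in t' for some title t
lemma pv_isIn_join (w : String) (h0 : w.toList ≠ []) (hs : ' ' ∉ w.toList)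
    (titles : List String) :
    PySem.Str.isIn w (PySem.Str.join " " titles) = titles.any (fun t => PySem.Str.isIn w t) := by
  rw [Bool.eq_iff_iff, pv_isIn_infix, PySem.Str.toList_join]
  simp only [List.any_eq_true, pv_isIn_infix]
  rw [show (" " : String).toList = [' '] from rfl]
  rw [pv_infix_join w.toList h0 hs]
  constructor
  · rintro ⟨l, hl, h⟩
    rcases List.mem_map.mp hl with ⟨t, ht, rfl⟩
    exact ⟨t, ht, h⟩
  · rintro ⟨t, ht, h⟩
    exact ⟨t.toList, List.mem_map.mpr ⟨t, ht, rfl⟩, h⟩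

-- first-true index over 5 resp. 4 ordered conditions
def pvFt5 (b0 b1 b2 b3 b4 : Bool) : Nat :=
  if b0 then 0 else if b1 then 1 else if b2 then 2 else if b3 then 3 else if b4 then 4 else 5

def pvFt4 (b0 b1 b2 b3 : Bool) : Nat :=
  if b0 then 0 else if b1 then 1 else if b2 then 2 else if b3 then 3 else 4

lemma pvFt5_or (x0 x1 x2 x3 x4 y0 y1 y2 y3 y4 : Bool) :
    pvFt5 (x0 || y0) (x1 || y1) (x2 || y2) (x3 || y3) (x4 || y4)
      = min (pvFt5 x0 x1 x2 x3 x4) (pvFt5 y0 y1 y2 y3 y4) := by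
  revert x0 x1 x2 x3 x4 y0 y1 y2 y3 y4; decide

lemma pvFt4_or (x0 x1 x2 x3 y0 y1 y2 y3 : Bool) :
    pvFt4 (x0 || y0) (x1 || y1) (x2 || y2) (x3 || y3)
      = min (pvFt4 x0 x1 x2 x3) (pvFt4 y0 y1 y2 y3) := by
  revert x0 x1 x2 x3 y0 y1 y2 y3; decide

-- keyword-hit abbreviations for a single title
def pvHitR (t : String) (i : Nat) : Bool :=
  ((pvRoomGroups.getD i ([], "")).1).any (fun w => PySem.Str.isIn w t)
def pvHitS (t : String) (i : Nat) : Bool :=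
  ((pvStyleGroups.getD i ([], "")).1).any (fun w => PySem.Str.isIn w t)

lemma pvFirstIndexR (t : String) :
    pvFirstIndex t pvRoomGroups = pvFt5 (pvHitR t 0) (pvHitR t 1) (pvHitR t 2) (pvHitR t 3) (pvHitR t 4) := by
  simp only [pvRoomGroups, pvFirstIndex, pvHitR, pvFt5, List.getD]
  split_ifs <;> simp_all

lemma pvFirstIndexS (t : String) :
    pvFirstIndex t pvStyleGroups = pvFt4 (pvHitS t 0) (pvHitS t 1) (pvHitS t 2) (pvHitS t 3) := by
  simp only [pvStyleGroups, pvFirstIndex, pvHitS, pvFt4, List.getD]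
  split_ifs <;> simp_all

-- the fold over titles computes the first-true index of the per-group "any title hits" booleans
lemma pv_fold_chain (titles : List String) : ∀ (a b : Nat), a ≤ 5 → b ≤ 4 →
    titles.foldl (fun (acc : Nat × Nat) t =>
        (min acc.1 (pvFirstIndex t pvRoomGroups), min acc.2 (pvFirstIndex t pvStyleGroups))) (a, b)
      = (min a (pvFt5 (titles.any (pvHitR · 0)) (titles.any (pvHitR · 1)) (titles.any (pvHitR · 2)) (titles.any (pvHitR · 3)) (titles.any (pvHitR · 4))),
         min b (pvFt4 (titles.any (pvHitS · 0)) (titles.any (pvHitS · 1)) (titles.any (pvHitS · 2)) (titles.any (pvHitS · 3)))) := by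
  induction titles with
  | nil =>
    intro a b ha hb
    simp only [List.foldl_nil, List.any_nil, pvFt5, pvFt4]
    simp [Nat.min_eq_left ha, Nat.min_eq_left hb]
  | cons t ts ih =>
    intro a b ha hb
    simp only [List.foldl_cons, List.any_cons]
    rw [ih (min a (pvFirstIndex t pvRoomGroups)) (min b (pvFirstIndex t pvStyleGroups))
        (le_trans (Nat.min_le_left _ _) ha) (le_trans (Nat.min_le_left _ _) hb)]
    rw [pvFt5_or, pvFt4_or, ← pvFirstIndexR, ← pvFirstIndexS]
    rw [Nat.min_assoc, Nat.min_assoc]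

-- pointwise-congruence for List.any over the members
lemma pv_any_congr {α : Type} (l : List α) (f g : α → Bool) (h : ∀ x ∈ l, f x = g x) :
    l.any f = l.any g := by
  induction l with
  | nil => rfl
  | cons a t ih =>
    simp only [List.any_cons, h a (List.mem_cons_self), ih (fun x hx => h x (List.mem_cons_of_mem a hx))]

-- swapping the two 'any's in A's branch conditions
lemma pv_any_swap (ws ts : List String) :
    (ws.any fun w => ts.any fun t => PySem.Str.isIn w t)
      = (ts.any fun t => ws.any fun w => PySem.Str.isIn w t) := by
  rw [Bool.eq_iff_iff]
  simp only [List.any_eq_true]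
  constructor
  · rintro ⟨w, hw, t, ht, h⟩; exact ⟨t, ht, w, hw, h⟩
  · rintro ⟨t, ht, w, hw, h⟩; exact ⟨w, hw, t, ht, h⟩

-- A's branch condition, pushed through the join and swapped to per-title form
lemma pv_cond (titles : List String) (ws : List String)
    (h : ∀ w ∈ ws, w.toList ≠ [] ∧ ' ' ∉ w.toList) :
    (ws.any fun w => PySem.Str.isIn w (PySem.Str.join " " titles))
      = (titles.any fun t => ws.any fun w => PySem.Str.isIn w t) := by
  rw [pv_any_congr ws _ _ (fun w hw => pv_isIn_join w (h w hw).1 (h w hw).2 titles), pv_any_swap]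

-- indexing the label tables at a first-true index reproduces the if/elif labels
lemma pv_label5 (b0 b1 b2 b3 b4 : Bool) :
    (match pvRoomGroups[pvFt5 b0 b1 b2 b3 b4]? with
      | some g => g.2
      | none => "interior space")
      = (if b0 then "bedroom" else if b1 then "living room" else if b2 then "bathroom"
         else if b3 then "dining room" else if b4 then "home office" else "interior space") := by
  cases b0 <;> cases b1 <;> cases b2 <;> cases b3 <;> cases b4 <;> rfl

lemma pv_label4 (b0 b1 b2 b3 : Bool) :
    (match pvStyleGroups[pvFt4 b0 b1 b2 b3]? with
      | some g => g.2
      | none => "modern cohesive design")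
      = (if b0 then "traditional elegant design" else if b1 then "rustic warm design"
         else if b2 then "industrial modern design" else if b3 then "minimalist clean design"
         else "modern cohesive design") := by
  cases b0 <;> cases b1 <;> cases b2 <;> cases b3 <;> rfl

-- ===== VERDICT (by name: the statement is the Claim_ definition above) =====
theorem generate_style_prompt_py_spec : Claim_equal_generate_style_prompt_py := by
  intro products _
  unfold Spec_generate_style_prompt_py generate_style_prompt_py generate_style_prompt_py_alt
  set titles := products.map (fun p => PySem.Str.lower (PySem.Dict.getD (PySem.Dict.ofList p) "title" "")) with htitles
  rw [show (products.foldl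
      (fun (acc : Nat × Nat) p =>
        let t := PySem.Str.lower (PySem.Dict.getD (PySem.Dict.ofList p) "title" "")
        (min acc.1 (pvFirstIndex t pvRoomGroups), min acc.2 (pvFirstIndex t pvStyleGroups)))
      (pvRoomGroups.length, pvStyleGroups.length))
      = titles.foldl (fun (acc : Nat × Nat) t =>
          (min acc.1 (pvFirstIndex t pvRoomGroups), min acc.2 (pvFirstIndex t pvStyleGroups)))
          (5, 4) from by rw [htitles, List.foldl_map]; rfl]
  rw [pv_fold_chain titles 5 4 (le_refl 5) (le_refl 4)]
  rw [show min 5 (pvFt5 (titles.any (pvHitR · 0)) (titles.any (pvHitR · 1)) (titles.any (pvHitR · 2)) (titles.any (pvHitR · 3)) (titles.any (pvHitR · 4))) = pvFt5 (titles.any (pvHitR · 0)) (titles.any (pvHitR · 1)) (titles.any (pvHitR · 2)) (titles.any (pvHitR · 3)) (titles.any (pvHitR · 4)) from Nat.min_eq_right (by unfold pvFt5; split_ifs <;> omega)]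
  rw [show min 4 (pvFt4 (titles.any (pvHitS · 0)) (titles.any (pvHitS · 1)) (titles.any (pvHitS · 2)) (titles.any (pvHitS · 3))) = pvFt4 (titles.any (pvHitS · 0)) (titles.any (pvHitS · 1)) (titles.any (pvHitS · 2)) (titles.any (pvHitS · 3)) from Nat.min_eq_right (by unfold pvFt4; split_ifs <;> omega)]
  dsimp only
  rw [pv_label5, pv_label4]
  rw [pv_cond titles ["bed", "nightstand", "dresser"] (by decide),
      pv_cond titles ["sofa", "coffee", "tv", "entertainment"] (by decide),
      pv_cond titles ["vanity", "bath", "toilet", "shower"] (by decide),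
      pv_cond titles ["table", "chair", "dining"] (by decide),
      pv_cond titles ["desk", "office", "study"] (by decide),
      pv_cond titles ["traditional", "classic", "antique"] (by decide),
      pv_cond titles ["rustic", "farmhouse", "country"] (by decide),
      pv_cond titles ["industrial", "metal", "concrete"] (by decide),
      pv_cond titles ["minimalist", "simple", "clean"] (by decide)]
  simp only [pvHitR, pvHitS, pvRoomGroups, pvStyleGroups, List.getD]
  rfl
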